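-- pv_equiv track=rewrite | github.com/sblumenf/podcastknowledge | seeding_pipeline/main.py | extract_title_from_filename
-- ===== SOURCE A (Python) =====
-- def extract_title_from_filename(filename: str) -> str:
--     """Extract a clean title from a VTT filename.
--
--     Args:
--         filename: The filename without extension
--
--     Returns:
--         Cleaned title
--     """
--     # Remove date prefix if present (e.g., "2022-10-06_")
--     parts = filename.split('_', 1)
--     if len(parts) > 1 and parts[0].count('-') == 2:
--         # Check if first part looks like a date
--         try:
--             # Simple date validation
--             date_parts = parts[0].split('-')
--             if len(date_parts) == 3 and all(p.isdigit() for p in date_parts):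
--                 title = parts[1]
--             else:
--                 title = filename
--         except:
--             title = filename
--     else:
--         title = filename
--
--     # Replace underscores with spaces
--     title = title.replace('_', ' ')
--
--     # Clean up common patterns
--     title = title.replace('&', 'and')
--
--     return title
-- ===== SOURCE B (Python) =====
-- def extract_title_from_filename(filename: str) -> str:
--     """Extract a clean title from a VTT filename (date prefix stripped)."""
--     cut = filename.find('_')
--     if cut != -1 and _is_date_prefix(filename[:cut]):
--         title = filename[cut + 1:]
--     else:
--         title = filename
--     return title.replace('_', ' ').replace('&', 'and')
--
--
-- def _is_date_prefix(s: str) -> bool: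
--     """One-pass check that s is three non-empty digit groups joined by '-'."""
--     dashes = 0
--     group_len = 0
--     for c in s:
--         if c == '-':
--             if group_len == 0:
--                 return False
--             dashes += 1
--             group_len = 0
--         elif c.isdigit():
--             group_len += 1
--         else:
--             return False
--     return dashes == 2 and group_len > 0
-- ===== Notes on version B (the rewrite author's own statement) =====
-- stated objective: alternative
-- what changed: Replaces split('_',1)/count('-')/split('-')/all-isdigit validation (plus a dead try/except) by a find/slice prefix cut and a single-pass state-machine scan of the candidate date prefix; the two .replace calls are kept.
import Mathlib
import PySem

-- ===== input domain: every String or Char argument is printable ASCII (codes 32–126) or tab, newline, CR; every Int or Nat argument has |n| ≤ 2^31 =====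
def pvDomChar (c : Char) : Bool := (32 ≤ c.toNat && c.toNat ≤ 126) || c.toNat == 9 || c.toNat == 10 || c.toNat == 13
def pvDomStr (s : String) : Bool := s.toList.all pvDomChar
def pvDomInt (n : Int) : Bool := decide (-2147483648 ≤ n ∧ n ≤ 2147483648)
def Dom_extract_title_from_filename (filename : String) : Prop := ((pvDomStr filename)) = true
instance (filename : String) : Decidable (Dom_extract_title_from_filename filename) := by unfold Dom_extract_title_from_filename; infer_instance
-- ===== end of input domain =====

-- B replaces A's split/count/isdigit date validation by a find/slice prefix cut plus a
-- one-pass character scan of the prefix (objective: alternative, same cost; no try/except,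
-- no intermediate piece lists).

-- ===== PORT A =====
def extract_title_from_filename (filename : String) : String :=
  let s := filename.toList
  -- parts = filename.split('_', 1)
  let parts := PySem.Chars.splitOnMax s ['_'] 1
  let title :=
    if parts.length > 1 ∧ PySem.Chars.count (PySem.List.pyGetD parts 0 []) ['-'] = 2 then
      -- date_parts = parts[0].split('-')
      let dateParts := PySem.Chars.splitOn (PySem.List.pyGetD parts 0 []) ['-']
      if dateParts.length = 3 ∧ dateParts.all PySem.Chars.strIsdigit = true then
        PySem.List.pyGetD parts 1 []
      else s
    else s
  -- title.replace('_', ' ').replace('&', 'and')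
  String.mk (PySem.Chars.replace (PySem.Chars.replace title ['_'] [' ']) ['&'] ['a', 'n', 'd'])

-- ===== PORT B =====
-- _is_date_prefix: one-pass scan, state = (dashes seen, length of current digit group)
def pvScanDate : List Char → Nat → Nat → Bool
  | [], dashes, groupLen => dashes == 2 && decide (0 < groupLen)
  | c :: rest, dashes, groupLen =>
    if c = '-' then
      if groupLen = 0 then false else pvScanDate rest (dashes + 1) 0
    else if PySem.Chars.isdigit c then pvScanDate rest dashes (groupLen + 1)
    else false

def extract_title_from_filename_alt (filename : String) : String :=
  let s := filename.toList
  -- cut = filename.find('_')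
  let cut := PySem.Chars.find s ['_']
  let title :=
    if cut ≠ -1 ∧ pvScanDate (PySem.Chars.slice s none (some cut)) 0 0 = true then
      PySem.Chars.slice s (some (cut + 1)) none
    else s
  String.mk (PySem.Chars.replace (PySem.Chars.replace title ['_'] [' ']) ['&'] ['a', 'n', 'd'])

-- ===== PRECONDITION & SPEC =====
def Spec_extract_title_from_filename (filename : String) (out : String) : Prop := out = extract_title_from_filename_alt filename
instance (filename : String) (out : String) : Decidable (Spec_extract_title_from_filename filename out) := by unfold Spec_extract_title_from_filename; infer_instance

-- ===== CLAIM (what is proved, stated in full; the proofs are below) =====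
def Claim_equal_extract_title_from_filename : Prop := ∀ (filename : String), Dom_extract_title_from_filename filename → Spec_extract_title_from_filename filename (extract_title_from_filename filename)

-- ===== LEMMAS AND PROOFS =====

-- one-step unfoldings (by rfl) of the fuelled loops inside the PySem string primitives
theorem pv_son_nil (c : Char) (n : Nat) (cur : List Char) (acc : List (List Char)) :
    PySem.Chars.splitOn.go [c] (n + 1) [] cur acc = (cur.reverse :: acc).reverse := rfl

theorem pv_son_cons (c : Char) (n : Nat) (x : Char) (rest cur : List Char) (acc : List (List Char)) :
    PySem.Chars.splitOn.go [c] (n + 1) (x :: rest) cur acc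
      = if List.isPrefixOf [c] (x :: rest) = true then
          PySem.Chars.splitOn.go [c] n rest [] (cur.reverse :: acc)
        else PySem.Chars.splitOn.go [c] n rest (x :: cur) acc := rfl

theorem pv_cnt_zero (c : Char) (s : List Char) (acc : Nat) :
    PySem.Chars.count.go [c] 0 s acc = acc := rfl

theorem pv_cnt_nil (c : Char) (n : Nat) (acc : Nat) :
    PySem.Chars.count.go [c] (n + 1) [] acc = acc := rfl

theorem pv_cnt_cons (c : Char) (n : Nat) (x : Char) (rest : List Char) (acc : Nat) :
    PySem.Chars.count.go [c] (n + 1) (x :: rest) acc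
      = if List.isPrefixOf [c] (x :: rest) = true then
          PySem.Chars.count.go [c] n rest (acc + 1)
        else PySem.Chars.count.go [c] n rest acc := rfl

theorem pv_smax_nil (c : Char) (n m : Nat) (cur : List Char) (acc : List (List Char)) :
    PySem.Chars.splitOnMax.go [c] (n + 1) m [] cur acc = (cur.reverse :: acc).reverse := rfl

theorem pv_smax_cons (c : Char) (n : Nat) (x : Char) (rest cur : List Char) (acc : List (List Char)) :
    PySem.Chars.splitOnMax.go [c] (n + 1) 1 (x :: rest) cur acc
      = if List.isPrefixOf [c] (x :: rest) = true then
          PySem.Chars.splitOnMax.go [c] n 0 rest [] (cur.reverse :: acc)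
        else PySem.Chars.splitOnMax.go [c] n 1 rest (x :: cur) acc := rfl

theorem pv_smax_zero_cons (c : Char) (n : Nat) (x : Char) (rest cur : List Char) (acc : List (List Char)) :
    PySem.Chars.splitOnMax.go [c] (n + 1) 0 (x :: rest) cur acc
      = ((cur.reverse ++ x :: rest) :: acc).reverse := rfl

theorem pv_find_nil (c : Char) (k : Nat) :
    PySem.Chars.find.go [c] [] k = -1 := rfl

theorem pv_find_cons (c : Char) (x : Char) (t : List Char) (k : Nat) :
    PySem.Chars.find.go [c] (x :: t) k
      = if List.isPrefixOf [c] (x :: t) = true then (k : Int)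
        else PySem.Chars.find.go [c] t (k + 1) := rfl

-- Chars.splitOn with a single-character separator is Mathlib's splitOnP.
theorem pv_splitOn_go (c : Char) : ∀ (fuel : Nat) (s cur : List Char) (acc : List (List Char)),
    s.length < fuel →
    PySem.Chars.splitOn.go [c] fuel s cur acc
      = acc.reverse ++ (s.splitOnP (· == c)).modifyHead (cur.reverse ++ ·) := by
  intro fuel
  induction fuel with
  | zero => intro s cur acc h; exact absurd h (by omega)
  | succ n ih =>
    intro s cur acc h
    cases s with
    | nil => rw [pv_son_nil]; simp [List.splitOnP_nil]
    | cons x rest =>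
      by_cases hx : x = c
      · subst hx
        rw [pv_son_cons, if_pos (by simp [List.isPrefixOf])]
        rw [ih rest [] (cur.reverse :: acc) (by simp only [List.length_cons] at h; omega)]
        rw [List.splitOnP_cons]
        obtain ⟨p, ps, hps⟩ := List.exists_cons_of_ne_nil (List.splitOnP_ne_nil (· == x) rest)
        simp [hps]
      · have hpre : List.isPrefixOf [c] (x :: rest) = false := by
          simp [List.isPrefixOf]; exact fun hcx => (hx hcx.symm).elim
        rw [pv_son_cons]
        simp only [hpre, Bool.false_eq_true, if_false]
        rw [ih rest (x :: cur) acc (by simp only [List.length_cons] at h; omega)]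
        rw [List.splitOnP_cons]
        have hxc : ((x == c) = false) := by simp [hx]
        simp only [hxc, Bool.false_eq_true, if_false]
        obtain ⟨p, ps, hps⟩ := List.exists_cons_of_ne_nil (List.splitOnP_ne_nil (· == c) rest)
        simp [hps]

theorem pv_splitOn_singleton (c : Char) (s : List Char) :
    PySem.Chars.splitOn s [c] = s.splitOnP (· == c) := by
  rw [PySem.Chars.splitOn, pv_splitOn_go c (s.length + 1) s [] [] (by omega)]
  obtain ⟨p, ps, hps⟩ := List.exists_cons_of_ne_nil (List.splitOnP_ne_nil (· == c) s)
  simp [hps]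

-- Chars.count with a single-character pattern is List.count.
theorem pv_count_go (c : Char) : ∀ (fuel : Nat) (s : List Char) (acc : Nat),
    s.length ≤ fuel → PySem.Chars.count.go [c] fuel s acc = acc + s.count c := by
  intro fuel
  induction fuel with
  | zero =>
    intro s acc h
    have hs : s = [] := List.length_eq_zero_iff.mp (Nat.le_zero.mp h)
    subst hs
    rw [pv_cnt_zero]; simp
  | succ n ih =>
    intro s acc h
    cases s with
    | nil => rw [pv_cnt_nil]; simp
    | cons x rest =>
      by_cases hx : x = c
      · subst hx
        rw [pv_cnt_cons, if_pos (by simp [List.isPrefixOf])]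
        rw [ih rest (acc + 1) (by simp only [List.length_cons] at h; omega)]
        simp
        omega
      · have hpre : List.isPrefixOf [c] (x :: rest) = false := by
          simp [List.isPrefixOf]; exact fun hcx => (hx hcx.symm).elim
        rw [pv_cnt_cons]
        simp only [hpre, Bool.false_eq_true, if_false]
        rw [ih rest acc (by simp only [List.length_cons] at h; omega)]
        simp [hx]

theorem pv_count_singleton (c : Char) (s : List Char) :
    PySem.Chars.count s [c] = s.count c := by
  rw [PySem.Chars.count]
  simp only [List.isEmpty_cons, Bool.false_eq_true, if_false]
  simpa using pv_count_go c s.length s 0 le_rfl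

-- split(sep, 1) when the separator is absent: one piece.
theorem pv_splitOnMax_go_none (c : Char) : ∀ (fuel : Nat) (s cur : List Char) (acc : List (List Char)),
    s.length < fuel → c ∉ s →
    PySem.Chars.splitOnMax.go [c] fuel 1 s cur acc = ((cur.reverse ++ s) :: acc).reverse := by
  intro fuel
  induction fuel with
  | zero => intro s cur acc h _; exact absurd h (by omega)
  | succ n ih =>
    intro s cur acc h hc
    cases s with
    | nil => rw [pv_smax_nil]; simp
    | cons x rest =>
      have hx : ¬ (x = c) := fun hxc => hc (by simp [hxc])
      have hpre : List.isPrefixOf [c] (x :: rest) = false := by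
        simp [List.isPrefixOf]; exact fun hcx => (hx hcx.symm).elim
      rw [pv_smax_cons]
      simp only [hpre, Bool.false_eq_true, if_false]
      rw [ih rest (x :: cur) acc (by simp only [List.length_cons] at h; omega)
        (fun hm => hc (by simp [hm]))]
      simp

-- after the first separator with maxsplit exhausted (m = 0): the rest is one piece.
theorem pv_splitOnMax_go_zero (c : Char) (fuel : Nat) (b cur : List Char) (acc : List (List Char))
    (h : 0 < fuel) :
    PySem.Chars.splitOnMax.go [c] fuel 0 b cur acc = ((cur.reverse ++ b) :: acc).reverse := by
  obtain ⟨n, rfl⟩ : ∃ n, fuel = n + 1 := ⟨fuel - 1, by omega⟩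
  cases b with
  | nil => rw [pv_smax_nil]; simp
  | cons x rest => rw [pv_smax_zero_cons]

-- split(sep, 1) at the first occurrence: exactly two pieces.
theorem pv_splitOnMax_go_split (c : Char) : ∀ (a : List Char) (fuel : Nat) (b cur : List Char)
    (acc : List (List Char)), a.length + 1 < fuel → c ∉ a →
    PySem.Chars.splitOnMax.go [c] fuel 1 (a ++ c :: b) cur acc
      = acc.reverse ++ [cur.reverse ++ a, b] := by
  intro a
  induction a with
  | nil =>
    intro fuel b cur acc h _
    obtain ⟨n, rfl⟩ : ∃ n, fuel = n + 1 := ⟨fuel - 1, by omega⟩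
    rw [List.nil_append, pv_smax_cons, if_pos (by simp [List.isPrefixOf])]
    rw [pv_splitOnMax_go_zero c n b [] (cur.reverse :: acc) (by omega)]
    simp
  | cons d a' ih =>
    intro fuel b cur acc h hc
    obtain ⟨n, rfl⟩ : ∃ n, fuel = n + 1 := ⟨fuel - 1, by omega⟩
    have hd : ¬ (d = c) := fun hdc => hc (by simp [hdc])
    have hpre : List.isPrefixOf [c] (d :: (a' ++ c :: b)) = false := by
      simp [List.isPrefixOf]; exact fun hcd => (hd hcd.symm).elim
    rw [List.cons_append, pv_smax_cons]
    simp only [hpre, Bool.false_eq_true, if_false]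
    rw [ih n b (d :: cur) acc (by simp only [List.length_cons] at h; omega)
      (fun hm => hc (by simp [hm]))]
    simp

-- find with a single-character needle: absent
theorem pv_find_none (c : Char) : ∀ (s : List Char) (k : Nat), c ∉ s →
    PySem.Chars.find.go [c] s k = -1 := by
  intro s
  induction s with
  | nil => intro k _; rw [pv_find_nil]
  | cons x t ih =>
    intro k hc
    have hx : ¬ (x = c) := fun h => hc (by simp [h])
    have hpre : List.isPrefixOf [c] (x :: t) = false := by
      simp [List.isPrefixOf]; exact fun hcx => (hx hcx.symm).elim
    rw [pv_find_cons]
    simp only [hpre, Bool.false_eq_true, if_false]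
    exact ih (k + 1) (fun hm => hc (by simp [hm]))

-- find with a single-character needle at its first occurrence.
theorem pv_find_go (c : Char) : ∀ (a : List Char) (b : List Char) (k : Nat), c ∉ a →
    PySem.Chars.find.go [c] (a ++ c :: b) k = (k : Int) + a.length := by
  intro a
  induction a with
  | nil =>
    intro b k _
    rw [List.nil_append, pv_find_cons, if_pos (by simp [List.isPrefixOf])]
    simp
  | cons d a' ih =>
    intro b k hc
    have hd : ¬ (d = c) := fun hdc => hc (by simp [hdc])
    have hpre : List.isPrefixOf [c] (d :: (a' ++ c :: b)) = false := by
      simp [List.isPrefixOf]; exact fun hcd => (hd hcd.symm).elim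
    rw [List.cons_append, pv_find_cons]
    simp only [hpre, Bool.false_eq_true, if_false]
    rw [ih b (k + 1) (fun hm => hc (by simp [hm]))]
    simp only [List.length_cons]
    push_cast
    ring

theorem pv_find_split (c : Char) (a b : List Char) (hc : c ∉ a) :
    PySem.Chars.find (a ++ c :: b) [c] = (a.length : Int) := by
  rw [PySem.Chars.find, pv_find_go c a b 0 hc]
  simp

-- first occurrence decomposition
theorem pv_first_split {c : Char} : ∀ {s : List Char}, c ∈ s →
    ∃ a b, s = a ++ c :: b ∧ c ∉ a := by
  intro s
  induction s with
  | nil => intro h; simp at h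
  | cons x t ih =>
    intro h
    by_cases hx : x = c
    · exact ⟨[], t, by simp [hx], by simp⟩
    · have hmem : c ∈ t := by
        rcases List.mem_cons.mp h with h' | h'
        · exact absurd h'.symm hx
        · exact h'
      obtain ⟨a, b, rfl, ha⟩ := ih hmem
      refine ⟨x :: a, b, by simp, ?_⟩
      intro hmem2
      rcases List.mem_cons.mp hmem2 with h' | h'
      · exact hx h'.symm
      · exact ha h'

-- number of splitOnP pieces = separator count + 1
theorem pv_len_splitOnP (c : Char) : ∀ (s : List Char),
    (s.splitOnP (· == c)).length = s.count c + 1 := by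
  intro s
  induction s with
  | nil => simp
  | cons x t ih =>
    by_cases hx : x = c
    · subst hx; simp [List.splitOnP_cons, ih]
    · simp [List.splitOnP_cons, hx, ih]

theorem pv_strIsdigit_iff (p : List Char) :
    PySem.Chars.strIsdigit p = true ↔ p ≠ [] ∧ p.all PySem.Chars.isdigit = true := by
  rw [PySem.Chars.strIsdigit]
  cases p <;> simp

-- master invariant for the one-pass scan, stated against splitOnP
theorem pv_scan_spec : ∀ (s : List Char) (dashes groupLen : Nat),
    pvScanDate s dashes groupLen = true ↔
      (dashes + (s.splitOnP (· == '-')).length = 3 ∧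
       (0 < groupLen ∨ (s.splitOnP (· == '-')).headD [] ≠ []) ∧
       (∀ p ∈ s.splitOnP (· == '-'), p.all PySem.Chars.isdigit = true) ∧
       (∀ p ∈ (s.splitOnP (· == '-')).tail, p ≠ [])) := by
  intro s
  induction s with
  | nil =>
    intro dashes groupLen
    simp [pvScanDate, List.splitOnP_nil]
  | cons x rest ih =>
    intro dashes groupLen
    obtain ⟨q, qs, hq⟩ := List.exists_cons_of_ne_nil (List.splitOnP_ne_nil (· == '-') rest)
    by_cases hx : x = '-'
    · subst hx
      rw [List.splitOnP_cons]
      simp only [beq_self_eq_true, if_true, hq]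
      by_cases hg : groupLen = 0
      · constructor
        · intro h; simp [pvScanDate, hg] at h
        · rintro ⟨h1, h2, h3, h4⟩
          exfalso
          rcases h2 with h2 | h2
          · omega
          · simp at h2
      · have hscan : pvScanDate ('-' :: rest) dashes groupLen = pvScanDate rest (dashes + 1) 0 := by
          simp [pvScanDate, hg]
        rw [hscan, ih (dashes + 1) 0, hq]
        simp only [List.headD_cons, List.length_cons, List.tail_cons, List.mem_cons]
        constructor
        · rintro ⟨h1, h2, h3, h4⟩
          have hqne : q ≠ [] := by
            rcases h2 with h2 | h2
            · omega
            · exact h2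
          refine ⟨by omega, Or.inl (by omega), ?_, ?_⟩
          · rintro p (rfl | hp)
            · simp
            · exact h3 p hp
          · rintro p (rfl | hp)
            · exact hqne
            · exact h4 p hp
        · rintro ⟨h1, h2, h3, h4⟩
          refine ⟨by omega, Or.inr (h4 q (Or.inl rfl)), ?_, ?_⟩
          · intro p hp
            exact h3 p (Or.inr hp)
          · intro p hp
            exact h4 p (Or.inr hp)
    · have hxb : ((x == '-') = false) := by simp [hx]
      rw [List.splitOnP_cons]
      simp only [hxb, Bool.false_eq_true, if_false, hq, List.modifyHead_cons]
      by_cases hd : PySem.Chars.isdigit x = true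
      · have hscan : pvScanDate (x :: rest) dashes groupLen = pvScanDate rest dashes (groupLen + 1) := by
          simp [pvScanDate, hx, hd]
        rw [hscan, ih dashes (groupLen + 1), hq]
        simp only [List.headD_cons, List.length_cons, List.tail_cons, List.mem_cons]
        constructor
        · rintro ⟨h1, h2, h3, h4⟩
          have hqd : q.all PySem.Chars.isdigit = true := h3 q (Or.inl rfl)
          refine ⟨by omega, Or.inr (by simp), ?_, h4⟩
          · rintro p (rfl | hp)
            · simp [List.all_cons, hd, hqd]
            · exact h3 p (Or.inr hp)
        · rintro ⟨h1, h2, h3, h4⟩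
          have hxq : (x :: q).all PySem.Chars.isdigit = true := h3 (x :: q) (Or.inl rfl)
          have hqd : q.all PySem.Chars.isdigit = true := by
            simp only [List.all_cons, Bool.and_eq_true] at hxq; exact hxq.2
          refine ⟨by omega, Or.inl (by omega), ?_, h4⟩
          · rintro p (rfl | hp)
            · exact hqd
            · exact h3 p (Or.inr hp)
      · constructor
        · intro h; simp [pvScanDate, hx, hd] at h
        · rintro ⟨h1, h2, h3, h4⟩
          exfalso
          have := h3 (x :: q) (by simp)
          simp [List.all_cons, hd] at this

-- A's date test on the prefix equals B's one-pass scan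
theorem pv_cond_eq (a : List Char) :
    (PySem.Chars.count a ['-'] = 2 ∧ (PySem.Chars.splitOn a ['-']).length = 3 ∧
      (PySem.Chars.splitOn a ['-']).all PySem.Chars.strIsdigit = true)
    ↔ pvScanDate a 0 0 = true := by
  rw [pv_count_singleton, pv_splitOn_singleton, pv_scan_spec a 0 0]
  have hlen := pv_len_splitOnP '-' a
  constructor
  · rintro ⟨h1, h2, h3⟩
    obtain ⟨p1, p2, p3, hp⟩ := List.length_eq_three.mp h2
    rw [hp] at h3
    simp only [List.all_cons, List.all_nil, Bool.and_true, Bool.and_eq_true,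
      pv_strIsdigit_iff] at h3
    obtain ⟨⟨e1, d1⟩, ⟨e2, d2⟩, e3, d3⟩ := h3
    rw [hp]
    refine ⟨by simp, Or.inr (by simpa using e1), ?_, ?_⟩
    · intro p hp'
      simp only [List.mem_cons, List.not_mem_nil, or_false] at hp'
      rcases hp' with rfl | rfl | rfl
      · exact d1
      · exact d2
      · exact d3
    · intro p hp'
      simp only [List.tail_cons, List.mem_cons, List.not_mem_nil, or_false] at hp'
      rcases hp' with rfl | rfl
      · exact e2
      · exact e3
  · rintro ⟨h1, h2, h3, h4⟩
    have hlen3 : (a.splitOnP (· == '-')).length = 3 := by omega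
    obtain ⟨p1, p2, p3, hp⟩ := List.length_eq_three.mp hlen3
    rw [hp] at hlen h2 h3 h4 ⊢
    simp only [List.length_cons, List.length_nil] at hlen
    refine ⟨by omega, by simp, ?_⟩
    simp only [List.all_cons, List.all_nil, Bool.and_true, Bool.and_eq_true, pv_strIsdigit_iff]
    have hne1 : p1 ≠ [] := by
      rcases h2 with h2 | h2
      · exact absurd h2 (by omega)
      · simpa using h2
    refine ⟨⟨hne1, h3 p1 (by simp)⟩, ⟨?_, h3 p2 (by simp)⟩, ?_, h3 p3 (by simp)⟩
    · exact h4 p2 (by simp)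
    · exact h4 p3 (by simp)

-- the two computed titles agree
theorem pv_title_eq (s : List Char) :
    (if (PySem.Chars.splitOnMax s ['_'] 1).length > 1 ∧
        PySem.Chars.count (PySem.List.pyGetD (PySem.Chars.splitOnMax s ['_'] 1) 0 []) ['-'] = 2 then
       if (PySem.Chars.splitOn (PySem.List.pyGetD (PySem.Chars.splitOnMax s ['_'] 1) 0 []) ['-']).length = 3 ∧
          (PySem.Chars.splitOn (PySem.List.pyGetD (PySem.Chars.splitOnMax s ['_'] 1) 0 []) ['-']).all PySem.Chars.strIsdigit = true then
         PySem.List.pyGetD (PySem.Chars.splitOnMax s ['_'] 1) 1 []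
       else s
     else s)
    = (if PySem.Chars.find s ['_'] ≠ -1 ∧
          pvScanDate (PySem.Chars.slice s none (some (PySem.Chars.find s ['_']))) 0 0 = true then
         PySem.Chars.slice s (some (PySem.Chars.find s ['_'] + 1)) none
       else s) := by
  by_cases hm : '_' ∈ s
  · obtain ⟨a, b, rfl, ha⟩ := pv_first_split hm
    have hsm : PySem.Chars.splitOnMax (a ++ '_' :: b) ['_'] 1 = [a, b] := by
      rw [PySem.Chars.splitOnMax]
      rw [if_neg (by norm_num : ¬ ((1 : Int) < 0))]
      simp only [Int.toNat_one]
      rw [pv_splitOnMax_go_split '_' a ((a ++ '_' :: b).length + 1) b [] []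
        (by simp only [List.length_append, List.length_cons]; omega) ha]
      simp
    have hf : PySem.Chars.find (a ++ '_' :: b) ['_'] = (a.length : Int) := pv_find_split '_' a b ha
    have hs1 : PySem.Chars.slice (a ++ '_' :: b) none (some (a.length : Int)) = a := by
      simp only [PySem.Chars.slice_eq_listSlice, PySem.List.slice_to_natCast]
      exact List.take_left
    have hs2 : PySem.Chars.slice (a ++ '_' :: b) (some ((a.length : Int) + 1)) none = b := by
      have hcast : ((a.length : Int) + 1) = (((a.length + 1 : Nat)) : Int) := by push_cast; ring
      rw [hcast]
      simp only [PySem.Chars.slice_eq_listSlice, PySem.List.slice_from_natCast]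
      have hlist : a ++ '_' :: b = (a ++ ['_']) ++ b := by simp
      have hlen2 : (a ++ ['_']).length = a.length + 1 := by simp
      rw [hlist, ← hlen2]
      exact List.drop_left
    have hne : ((a.length : Int) ≠ -1) := by omega
    have hget0 : PySem.List.pyGetD ([a, b] : List (List Char)) (0 : Int) [] = a := by
      simp [PySem.List.pyGetD, PySem.List.pyGet?, PySem.List.pyIdx?]
    have hget1 : PySem.List.pyGetD ([a, b] : List (List Char)) (1 : Int) [] = b := by
      simp [PySem.List.pyGetD, PySem.List.pyGet?, PySem.List.pyIdx?]
    rw [hsm, hf]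
    rw [hget0, hget1, hs1, hs2]
    split_ifs with h1 h2 h3 h3 h3
    · rfl
    · exact absurd ⟨hne, (pv_cond_eq a).mp ⟨h1.2, h2.1, h2.2⟩⟩ h3
    · obtain ⟨c1, c2, c3⟩ := (pv_cond_eq a).mpr h3.2
      exact absurd ⟨c2, c3⟩ h2
    · rfl
    · obtain ⟨c1, c2, c3⟩ := (pv_cond_eq a).mpr h3.2
      exact absurd ⟨by simp, c1⟩ h1
    · rfl
  · have hsm : PySem.Chars.splitOnMax s ['_'] 1 = [s] := by
      rw [PySem.Chars.splitOnMax]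
      rw [if_neg (by norm_num : ¬ ((1 : Int) < 0))]
      simp only [Int.toNat_one]
      rw [pv_splitOnMax_go_none '_' (s.length + 1) s [] [] (by omega) hm]
      simp
    have hf : PySem.Chars.find s ['_'] = -1 := by
      rw [PySem.Chars.find]
      exact pv_find_none '_' s 0 hm
    rw [hsm, hf]
    simp

-- ===== VERDICT (by name: the statement is the Claim_ definition above) =====
theorem extract_title_from_filename_spec : Claim_equal_extract_title_from_filename := by
  intro filename _
  unfold Spec_extract_title_from_filename
  simp only [extract_title_from_filename, extract_title_from_filename_alt]
  rw [pv_title_eq filename.toList]
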